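-- pv_equiv track=rewrite | github.com/s-ilioukhina/tetris-genetic-algorithm | main.py | totalEmptyTilesAlone
-- ===== SOURCE A (Python) =====
-- def isWithinGrid(grid, x, y):
-- 	if x >= len(grid) or x < 0 or y >= len(grid[x]) or y < 0:
-- 		return False
-- 	return True
--
-- def totalEmptyTilesAlone(grid):
-- 	aloneTiles = 0
-- 	for x in range(len(grid)):
-- 		for y in range(len(grid[x])):
-- 			if grid[x][y] == 0:
-- 				pointSum = 0
-- 				ddx = [0, 0, 1, -1]
-- 				ddy = [1, -1, 0, 0]
-- 				for (dx, dy) in zip(ddx, ddy):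
-- 					if isWithinGrid(grid, x+dx, y+dy) and grid[x+dx][y+dy] == 0:
-- 						pointSum += 1
-- 				if pointSum == 0:
-- 					aloneTiles += 1
-- 	return aloneTiles
-- ===== SOURCE B (Python) =====
-- def totalEmptyTilesAlone(grid):
--     empties = {(x, y) for x, row in enumerate(grid) for y, v in enumerate(row) if v == 0}
--     notAlone = set()
--     for (x, y) in empties:
--         for n in ((x, y + 1), (x + 1, y)):
--             if n in empties:
--                 notAlone.add((x, y))
--                 notAlone.add(n)
--     return len(empties) - len(notAlone)
-- ===== Notes on version B (the rewrite author's own statement) =====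
-- stated objective: alternative
-- what changed: Instead of testing all four neighbors of every cell with bounds checks against the jagged grid, B builds a set of empty-cell coordinates once, scans only right/down adjacent empty pairs to collect a not-alone set, and returns len(empties) - len(notAlone).
import Mathlib
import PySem

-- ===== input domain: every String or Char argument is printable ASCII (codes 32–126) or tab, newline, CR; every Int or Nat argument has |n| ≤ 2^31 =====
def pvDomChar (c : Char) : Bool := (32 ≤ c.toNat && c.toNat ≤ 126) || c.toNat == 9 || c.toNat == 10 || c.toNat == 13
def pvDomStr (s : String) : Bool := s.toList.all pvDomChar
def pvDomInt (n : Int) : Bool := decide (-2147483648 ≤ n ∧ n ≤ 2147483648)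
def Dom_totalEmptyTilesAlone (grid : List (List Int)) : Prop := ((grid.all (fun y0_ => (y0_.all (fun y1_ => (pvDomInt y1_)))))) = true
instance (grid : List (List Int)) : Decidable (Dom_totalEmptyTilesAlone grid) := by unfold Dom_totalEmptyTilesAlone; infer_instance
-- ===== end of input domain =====

-- B replaces A's four bounds-checked neighbor probes per cell by a set of empty-cell
-- coordinates and a right/down adjacent-pair scan collecting a not-alone set
-- (alternative decomposition, same asymptotic cost).

-- ===== PORT A =====
def isWithinGrid (grid : List (List Int)) (x y : Int) : Bool :=
  -- Python short-circuit: grid[x] is only reached when 0 ≤ x < len(grid); pyGetD is total,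
  -- so evaluating it unconditionally yields the same Bool.
  if decide ((grid.length : Int) ≤ x) || decide (x < 0) ||
     decide (((PySem.List.pyGetD grid x []).length : Int) ≤ y) || decide (y < 0) then
    false
  else
    true

def totalEmptyTilesAlone (grid : List (List Int)) : Int :=
  (PySem.List.pyRange 0 (grid.length : Int)).foldl (fun aloneTiles x =>
    (PySem.List.pyRange 0 ((PySem.List.pyGetD grid x []).length : Int)).foldl (fun aloneTiles y =>
      if PySem.List.pyGetD (PySem.List.pyGetD grid x []) y 1 == 0 then
        let ddx : List Int := [0, 0, 1, -1]
        let ddy : List Int := [1, -1, 0, 0]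
        let pointSum : Int := (ddx.zip ddy).foldl (fun pointSum d =>
          if isWithinGrid grid (x + d.1) (y + d.2) &&
             (PySem.List.pyGetD (PySem.List.pyGetD grid (x + d.1) []) (y + d.2) 1 == 0) then
            pointSum + 1
          else pointSum) 0
        if pointSum == 0 then aloneTiles + 1 else aloneTiles
      else aloneTiles) aloneTiles) 0

-- ===== PORT B =====
def pvEmpties (grid : List (List Int)) : PySem.Set (Int × Int) :=
  PySem.Set.ofList ((PySem.List.enumerate grid).flatMap (fun xrow =>
    ((PySem.List.enumerate xrow.2).filter (fun yv => yv.2 == 0)).map (fun yv => (xrow.1, yv.1))))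

-- the iteration over the Python set only builds another set and takes len afterwards,
-- so the result does not depend on the (unmodelled) hash order
def totalEmptyTilesAlone_alt (grid : List (List Int)) : Int :=
  let empties := pvEmpties grid
  let notAlone : PySem.Set (Int × Int) := empties.foldl (fun notAlone c =>
    ([(c.1, c.2 + 1), (c.1 + 1, c.2)] : List (Int × Int)).foldl (fun notAlone n =>
      if PySem.Set.contains empties n then
        PySem.Set.add (PySem.Set.add notAlone c) n
      else notAlone) notAlone) PySem.Set.empty
  PySem.Set.len empties - PySem.Set.len notAlone

-- ===== PRECONDITION & SPEC =====
def Spec_totalEmptyTilesAlone (grid : List (List Int)) (out : Int) : Prop := out = totalEmptyTilesAlone_alt grid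
instance (grid : List (List Int)) (out : Int) : Decidable (Spec_totalEmptyTilesAlone grid out) := by unfold Spec_totalEmptyTilesAlone; infer_instance

-- ===== CLAIM (what is proved, stated in full; the proofs are below) =====
def Claim_equal_totalEmptyTilesAlone : Prop := ∀ (grid : List (List Int)), Dom_totalEmptyTilesAlone grid → Spec_totalEmptyTilesAlone grid (totalEmptyTilesAlone grid)

-- ===== LEMMAS AND PROOFS =====

-- the generator-order list of empty-cell coordinates (pvEmpties = Set.ofList of it)
def pvL (grid : List (List Int)) : List (Int × Int) :=
  (PySem.List.enumerate grid).flatMap (fun xrow =>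
    ((PySem.List.enumerate xrow.2).filter (fun yv => yv.2 == 0)).map (fun yv => (xrow.1, yv.1)))

-- "coordinate c lies inside the (jagged) grid and holds 0"
def cellB (grid : List (List Int)) (c : Int × Int) : Bool :=
  decide (0 ≤ c.1) && decide (c.1 < (grid.length : Int)) && decide (0 ≤ c.2) &&
  decide (c.2 < ((PySem.List.pyGetD grid c.1 []).length : Int)) &&
  (PySem.List.pyGetD (PySem.List.pyGetD grid c.1 []) c.2 1 == 0)

-- "c has an orthogonally adjacent empty in-grid neighbor"
def nbrB (grid : List (List Int)) (c : Int × Int) : Bool :=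
  cellB grid (c.1, c.2 + 1) || cellB grid (c.1, c.2 - 1) ||
  cellB grid (c.1 + 1, c.2) || cellB grid (c.1 - 1, c.2)

theorem mem_pvL (grid : List (List Int)) (c : Int × Int) :
    c ∈ pvL grid ↔ cellB grid c = true := by
  simp only [pvL, List.mem_flatMap, List.mem_map, List.mem_filter,
    PySem.List.mem_enumerate_iff, cellB, Bool.and_eq_true, decide_eq_true_eq, beq_iff_eq]
  constructor
  · rintro ⟨xr, ⟨k, hk, rfl⟩, yv, ⟨⟨m, hm, rfl⟩, hv⟩, rfl⟩
    simp only [zero_add] at *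
    have hget : PySem.List.pyGetD grid (k : Int) [] = grid[k] := by
      rw [PySem.List.pyGetD_eq_getElem grid [] (by positivity) (by exact_mod_cast hk)]
      simp
    refine ⟨⟨⟨⟨by positivity, by exact_mod_cast hk⟩, by positivity⟩, ?_⟩, ?_⟩
    · rw [hget]; exact_mod_cast hm
    · rw [hget]
      rw [PySem.List.pyGetD_eq_getElem grid[k] 1 (by positivity) (by exact_mod_cast hm)]
      simpa using hv
  · rintro ⟨⟨⟨⟨h1, h2⟩, h3⟩, h4⟩, h5⟩
    have hget : PySem.List.pyGetD grid c.1 [] = grid[c.1.toNat]'(by omega) :=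
      PySem.List.pyGetD_eq_getElem grid [] h1 h2
    have hv : PySem.List.pyGetD (PySem.List.pyGetD grid c.1 []) c.2 1
        = (PySem.List.pyGetD grid c.1 [])[c.2.toNat]'(by omega) :=
      PySem.List.pyGetD_eq_getElem _ 1 h3 h4
    refine ⟨(c.1, PySem.List.pyGetD grid c.1 []), ⟨c.1.toNat, by omega, ?_⟩,
      (c.2, (PySem.List.pyGetD grid c.1 [])[c.2.toNat]'(by omega)),
      ⟨⟨c.2.toNat, by show c.2.toNat < (PySem.List.pyGetD grid c.1 []).length; omega, ?_⟩, ?_⟩,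
      by simp⟩
    · exact Prod.ext (by simp [Int.toNat_of_nonneg h1]) (by simpa using hget)
    · exact Prod.ext (by simp [Int.toNat_of_nonneg h3]) rfl
    · rw [← hv]; exact h5

theorem nodup_pvL (grid : List (List Int)) : (pvL grid).Nodup := by
  unfold pvL
  rw [List.nodup_flatMap]
  constructor
  · intro xr _
    have h1 : List.Pairwise (fun (p q : Int × Int) => p.1 < q.1)
        ((PySem.List.enumerate xr.2).filter (fun yv => yv.2 == 0)) :=
      (PySem.List.pairwise_lt_enumerate xr.2 0).filter _
    exact h1.map (f := fun yv : Int × Int => (xr.1, yv.1)) (S := fun a b => a ≠ b)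
      (by intro a b hab heq
          exact absurd (congrArg Prod.snd heq) (by simpa using ne_of_lt hab))
  · refine (PySem.List.pairwise_lt_enumerate grid 0).imp ?_
    intro a b hab z hz1 hz2
    simp only [List.mem_map] at hz1 hz2
    obtain ⟨u, _, rfl⟩ := hz1
    obtain ⟨v, _, hv⟩ := hz2
    have := congrArg Prod.fst hv
    simp at this
    omega

theorem within_eq (grid : List (List Int)) (a b : Int) :
    (isWithinGrid grid a b && (PySem.List.pyGetD (PySem.List.pyGetD grid a []) b 1 == 0))
      = cellB grid (a, b) := by
  simp only [isWithinGrid]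
  split_ifs with h
  · simp only [Bool.false_and]
    cases hC : cellB grid (a, b)
    · rfl
    · exfalso
      simp only [cellB, Bool.and_eq_true, decide_eq_true_eq] at hC
      simp only [Bool.or_eq_true, decide_eq_true_eq] at h
      omega
  · simp only [Bool.true_and]
    simp only [Bool.or_eq_true, decide_eq_true_eq, not_or, not_le, not_lt] at h
    have e1 : decide ((0:Int) ≤ a) = true := decide_eq_true (by omega)
    have e2 : decide (a < (grid.length : Int)) = true := decide_eq_true (by omega)
    have e3 : decide ((0:Int) ≤ b) = true := decide_eq_true (by omega)
    have e4 : decide (b < ((PySem.List.pyGetD grid a []).length : Int)) = true :=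
      decide_eq_true (by omega)
    simp only [cellB, e1, e2, e3, e4, Bool.true_and]

-- ---- A-side: the double loop counts the empty cells with no empty neighbor ----

theorem pointSum_eq (grid : List (List Int)) (x y : Int) :
    ((((([0, 0, 1, -1] : List Int)).zip (([1, -1, 0, 0] : List Int))).foldl
      (fun pointSum d =>
        if isWithinGrid grid (x + d.1) (y + d.2) &&
           (PySem.List.pyGetD (PySem.List.pyGetD grid (x + d.1) []) (y + d.2) 1 == 0) then
          pointSum + 1
        else pointSum) (0 : Int)) == 0) = !nbrB grid (x, y) := by
  have e1 := within_eq grid (x + 0) (y + 1)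
  have e2 := within_eq grid (x + 0) (y + -1)
  have e3 := within_eq grid (x + 1) (y + 0)
  have e4 := within_eq grid (x + -1) (y + 0)
  simp only [List.zip, List.zipWith, List.foldl_cons, List.foldl_nil]
  rw [e1, e2, e3, e4]
  have c1 : ((x + 0 : Int), (y + 1 : Int)) = (x, y + 1) := by norm_num
  have c2 : ((x + 0 : Int), (y + -1 : Int)) = (x, y - 1) := by norm_num; ring
  have c3 : ((x + 1 : Int), (y + 0 : Int)) = (x + 1, y) := by norm_num
  have c4 : ((x + -1 : Int), (y + 0 : Int)) = (x - 1, y) := by norm_num; ring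
  rw [c1, c2, c3, c4]
  by_cases h1 : cellB grid (x, y + 1) <;>
  by_cases h2 : cellB grid (x, y - 1) <;>
  by_cases h3 : cellB grid (x + 1, y) <;>
  by_cases h4 : cellB grid (x - 1, y) <;>
    simp [h1, h2, h3, h4, nbrB]

theorem innerBody_eq (grid : List (List Int)) (x : Int) :
    (fun (aloneTiles y : Int) =>
      if PySem.List.pyGetD (PySem.List.pyGetD grid x []) y 1 == 0 then
        let ddx : List Int := [0, 0, 1, -1]
        let ddy : List Int := [1, -1, 0, 0]
        let pointSum : Int := (ddx.zip ddy).foldl (fun pointSum d =>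
          if isWithinGrid grid (x + d.1) (y + d.2) &&
             (PySem.List.pyGetD (PySem.List.pyGetD grid (x + d.1) []) (y + d.2) 1 == 0) then
            pointSum + 1
          else pointSum) 0
        if pointSum == 0 then aloneTiles + 1 else aloneTiles
      else aloneTiles)
    = (fun (aloneTiles y : Int) =>
        if (PySem.List.pyGetD (PySem.List.pyGetD grid x []) y 1 == 0) && !nbrB grid (x, y) then
          aloneTiles + 1
        else aloneTiles) := by
  funext aloneTiles y
  simp only
  rw [pointSum_eq grid x y]
  by_cases hv : (PySem.List.pyGetD (PySem.List.pyGetD grid x []) y 1 == 0) = true <;>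
  by_cases hn : nbrB grid (x, y) = true <;>
    simp [hv, hn]

def pvQ (grid : List (List Int)) (x : Int) : Int → Bool := fun y =>
  (PySem.List.pyGetD (PySem.List.pyGetD grid x []) y 1 == 0) && !nbrB grid (x, y)

def pvG (grid : List (List Int)) (x : Int) : Int :=
  ((PySem.List.pyRange 0 ((PySem.List.pyGetD grid x []).length : Int)).countP (pvQ grid x) : Int)

theorem A_sum (grid : List (List Int)) :
    totalEmptyTilesAlone grid
      = ((PySem.List.pyRange 0 (grid.length : Int)).map (pvG grid)).sum := by
  unfold totalEmptyTilesAlone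
  have houter : (fun (aloneTiles x : Int) =>
      (PySem.List.pyRange 0 ((PySem.List.pyGetD grid x []).length : Int)).foldl
        (fun aloneTiles y =>
          if PySem.List.pyGetD (PySem.List.pyGetD grid x []) y 1 == 0 then
            let ddx : List Int := [0, 0, 1, -1]
            let ddy : List Int := [1, -1, 0, 0]
            let pointSum : Int := (ddx.zip ddy).foldl (fun pointSum d =>
              if isWithinGrid grid (x + d.1) (y + d.2) &&
                 (PySem.List.pyGetD (PySem.List.pyGetD grid (x + d.1) []) (y + d.2) 1 == 0) then
                pointSum + 1
              else pointSum) 0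
            if pointSum == 0 then aloneTiles + 1 else aloneTiles
          else aloneTiles) aloneTiles)
      = (fun (aloneTiles x : Int) => aloneTiles + pvG grid x) := by
    funext aloneTiles x
    rw [innerBody_eq grid x]
    rw [PySem.List.foldl_count_if]
    rfl
  rw [houter, PySem.List.foldl_add]
  simp

theorem row_count (grid : List (List Int)) (j : Int) :
    pvG grid j
      = (((((PySem.List.enumerate (PySem.List.pyGetD grid j [])).filter
            (fun yv => yv.2 == 0)).map (fun yv => (j, yv.1))).filter
            (fun c => !nbrB grid c)).length : Int) := by
  rw [List.filter_map, List.length_map, ← List.countP_eq_length_filter,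
    List.countP_filter, PySem.List.enumerate_eq_map_pyRange (PySem.List.pyGetD grid j []) 1,
    List.countP_map]
  unfold pvG pvQ
  congr 1
  apply List.countP_congr
  intro m _
  simp only [Function.comp, Bool.and_eq_true]
  tauto

theorem A_eq (grid : List (List Int)) :
    totalEmptyTilesAlone grid
      = (((pvL grid).filter (fun c => !nbrB grid c)).length : Int) := by
  rw [A_sum]
  unfold pvL
  rw [PySem.List.enumerate_eq_map_pyRange grid []]
  rw [List.flatMap_map, List.filter_flatMap, List.length_flatMap]
  have hlen : PySem.List.len grid = (grid.length : Int) := rfl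
  rw [hlen, Nat.cast_list_sum, List.map_map]
  congr 1
  apply List.map_congr_left
  intro j _
  simp only [Function.comp]
  exact row_count grid j

-- ---- B-side: empties minus notAlone counts the same cells ----

def loopBody (E : PySem.Set (Int × Int)) (na : PySem.Set (Int × Int)) (c : Int × Int) :
    PySem.Set (Int × Int) :=
  ([(c.1, c.2 + 1), (c.1 + 1, c.2)] : List (Int × Int)).foldl (fun notAlone n =>
    if PySem.Set.contains E n then
      PySem.Set.add (PySem.Set.add notAlone c) n
    else notAlone) na

def touched (E : PySem.Set (Int × Int)) (c z : Int × Int) : Prop :=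
  ((c.1, c.2 + 1) ∈ E ∧ (z = c ∨ z = (c.1, c.2 + 1))) ∨
  ((c.1 + 1, c.2) ∈ E ∧ (z = c ∨ z = (c.1 + 1, c.2)))

theorem mem_loopBody (E na : PySem.Set (Int × Int)) (c z : Int × Int) :
    z ∈ loopBody E na c ↔ z ∈ na ∨ touched E c z := by
  simp only [loopBody, List.foldl_cons, List.foldl_nil, touched]
  split_ifs with h1 h2 h2 <;>
    simp only [PySem.Set.mem_add, PySem.Set.contains_iff] at * <;> tauto

theorem nodup_loopBody (E na : PySem.Set (Int × Int)) (c : Int × Int) (h : na.Nodup) :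
    (loopBody E na c).Nodup := by
  simp only [loopBody, List.foldl_cons, List.foldl_nil]
  split_ifs <;> repeat' first | assumption | apply PySem.Set.nodup_add

theorem mem_loop (E : PySem.Set (Int × Int)) (l : List (Int × Int))
    (na : PySem.Set (Int × Int)) (z : Int × Int) :
    z ∈ l.foldl (loopBody E) na ↔ z ∈ na ∨ ∃ c ∈ l, touched E c z := by
  induction l generalizing na with
  | nil => simp
  | cons c t ih =>
    simp only [List.foldl_cons, ih, mem_loopBody, List.mem_cons]
    constructor
    · rintro ((h | h) | ⟨d, hd, ht⟩)
      · exact Or.inl h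
      · exact Or.inr ⟨c, Or.inl rfl, h⟩
      · exact Or.inr ⟨d, Or.inr hd, ht⟩
    · rintro (h | ⟨d, (rfl | hd), ht⟩)
      · exact Or.inl (Or.inl h)
      · exact Or.inl (Or.inr ht)
      · exact Or.inr ⟨d, hd, ht⟩

theorem nodup_loop (E : PySem.Set (Int × Int)) (l : List (Int × Int))
    (na : PySem.Set (Int × Int)) (h : na.Nodup) : (l.foldl (loopBody E) na).Nodup := by
  induction l generalizing na with
  | nil => exact h
  | cons c t ih => exact ih _ (nodup_loopBody E na c h)

theorem touched_iff (grid : List (List Int)) (E : PySem.Set (Int × Int))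
    (hE : ∀ w, w ∈ E ↔ cellB grid w = true) (z : Int × Int) :
    (∃ c ∈ E, touched E c z) ↔ z ∈ E ∧ nbrB grid z = true := by
  simp only [touched, nbrB, Bool.or_eq_true]
  constructor
  · rintro ⟨c, hc, ⟨hn, (rfl | rfl)⟩ | ⟨hn, (rfl | rfl)⟩⟩
    · exact ⟨hc, Or.inl (Or.inl (Or.inl ((hE _).mp hn)))⟩
    · refine ⟨hn, Or.inl (Or.inl (Or.inr ?_))⟩
      have : ((c.1, c.2 + 1).1, (c.1, c.2 + 1).2 - 1) = c := by simp
      rw [this]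
      exact (hE _).mp hc
    · exact ⟨hc, Or.inl (Or.inr ((hE _).mp hn))⟩
    · refine ⟨hn, Or.inr ?_⟩
      have : ((c.1 + 1, c.2).1 - 1, (c.1 + 1, c.2).2) = c := by simp
      rw [this]
      exact (hE _).mp hc
  · rintro ⟨hz, (((h | h) | h) | h)⟩
    · exact ⟨z, hz, Or.inl ⟨(hE _).mpr h, Or.inl rfl⟩⟩
    · refine ⟨(z.1, z.2 - 1), (hE _).mpr h, Or.inl ⟨?_, Or.inr ?_⟩⟩
      · show (z.1, z.2 - 1 + 1) ∈ E
        simpa using hz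
      · show z = (z.1, z.2 - 1 + 1)
        simp
    · exact ⟨z, hz, Or.inr ⟨(hE _).mpr h, Or.inl rfl⟩⟩
    · refine ⟨(z.1 - 1, z.2), (hE _).mpr h, Or.inr ⟨?_, Or.inr ?_⟩⟩
      · show (z.1 - 1 + 1, z.2) ∈ E
        simpa using hz
      · show z = (z.1 - 1 + 1, z.2)
        simp

theorem B_eq (grid : List (List Int)) :
    totalEmptyTilesAlone_alt grid
      = (((pvL grid).filter (fun c => !nbrB grid c)).length : Int) := by
  have hnd := nodup_pvL grid
  have hE : pvEmpties grid = pvL grid := PySem.Set.ofList_eq_self_of_nodup (pvL grid) hnd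
  have hbody : totalEmptyTilesAlone_alt grid
      = PySem.Set.len (pvEmpties grid)
        - PySem.Set.len ((pvEmpties grid).foldl (loopBody (pvEmpties grid)) PySem.Set.empty) :=
    rfl
  set E := pvEmpties grid with hEdef
  set N := E.foldl (loopBody E) PySem.Set.empty with hN
  have hmemE : ∀ w, w ∈ E ↔ cellB grid w = true := by
    intro w; rw [hE]; exact mem_pvL grid w
  have hmemN : ∀ z, z ∈ N ↔ z ∈ E ∧ nbrB grid z = true := by
    intro z
    rw [hN, mem_loop]
    have hemp : z ∈ (PySem.Set.empty : PySem.Set (Int × Int)) ↔ False := by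
      simp [PySem.Set.empty]
    rw [hemp, false_or]
    exact touched_iff grid E hmemE z
  have hndE : E.Nodup := hE ▸ hnd
  have hndN : N.Nodup := nodup_loop E E PySem.Set.empty (by simp [PySem.Set.empty])
  have hperm : N.Perm (E.filter (fun c => nbrB grid c)) :=
    (List.perm_ext_iff_of_nodup hndN (hndE.filter _)).mpr
      (by intro a; simp [hmemN, List.mem_filter])
  have hlenN : N.length = (E.filter (fun c => nbrB grid c)).length := hperm.length_eq
  have hsplit : E.length
      = (E.filter (fun c => nbrB grid c)).length
        + (E.filter (fun c => !nbrB grid c)).length :=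
    List.length_eq_length_filter_add _
  rw [hbody]
  simp only [PySem.Set.len]
  have hfilter : (pvL grid).filter (fun c => !nbrB grid c)
      = E.filter (fun c => !nbrB grid c) := by rw [hE]
  rw [hfilter]
  omega

-- ===== VERDICT (by name: the statement is the Claim_ definition above) =====
theorem totalEmptyTilesAlone_spec : Claim_equal_totalEmptyTilesAlone := by
  intro grid _
  unfold Spec_totalEmptyTilesAlone
  rw [A_eq, B_eq]
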